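-- pv_equiv track=rewrite | github.com/DENGARDEN/problem-solving-study | problems/programmers/Lv. 3/42628/src/solution.py | solution
-- ===== SOURCE A (Python) =====
-- def solution(operations):
--     answer = []
--     for op in operations:
--         if op[0] == 'I':
--             answer.append(int(op[2:]))
--         elif op[0] == 'D':
--             if not answer:
--                 continue
--             if op[2:] == '1':
--                 answer.remove(max(answer))
--             else:
--                 answer.remove(min(answer))
--     return [max(answer), min(answer)] if answer else [0, 0]
-- ===== SOURCE B (Python) =====
-- def solution(operations):
--     # maintain an ascending sorted multiset; insert by hand-rolled binary search,
--     # delete max/min by popping at the ends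
--     heap = []
--     for op in operations:
--         kind = op[0]
--         if kind == 'I':
--             v = int(op[2:])
--             lo, hi = 0, len(heap)
--             while lo < hi:
--                 mid = (lo + hi) // 2
--                 if heap[mid] <= v:
--                     lo = mid + 1
--                 else:
--                     hi = mid
--             heap.insert(lo, v)
--         elif kind == 'D' and heap:
--             if op[2:] == '1':
--                 heap.pop()
--             else:
--                 heap.pop(0)
--     return [heap[-1], heap[0]] if heap else [0, 0]
-- ===== Notes on version B (the rewrite author's own statement) =====
-- stated objective: alternative
-- what changed: B maintains an ascending sorted multiset (binary-search insertion, pops at the ends for delete-max/delete-min) instead of A's rescanning the whole list with max()/min() and list.remove() at every delete.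
import Mathlib
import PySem

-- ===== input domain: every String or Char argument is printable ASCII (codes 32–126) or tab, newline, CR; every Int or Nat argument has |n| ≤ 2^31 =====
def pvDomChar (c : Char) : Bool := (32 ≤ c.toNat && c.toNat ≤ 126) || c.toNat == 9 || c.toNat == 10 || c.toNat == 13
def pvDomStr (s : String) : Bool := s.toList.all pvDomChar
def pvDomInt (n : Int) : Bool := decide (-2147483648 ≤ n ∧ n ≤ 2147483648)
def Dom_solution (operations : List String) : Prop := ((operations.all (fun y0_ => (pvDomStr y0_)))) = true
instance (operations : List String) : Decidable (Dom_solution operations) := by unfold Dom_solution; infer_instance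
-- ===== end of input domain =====

-- B maintains an ascending sorted multiset (binary-search insert, pop at the ends for
-- delete-max/min) instead of A's max()/min() rescans with list.remove() at every delete.

-- ===== PORT A =====
-- body of A's for-loop
def pvStepA (answer : List Int) (op : String) : List Int :=
  match PySem.Str.pyGet? op 0 with
  | none => answer        -- op[0] on "" raises IndexError; excluded by Pre_solution
  | some c =>
    if c = 'I' then
      match PySem.Int.ofStr? (PySem.Str.slice op (some 2) none) with
      | none => answer    -- int(op[2:]) raises ValueError; excluded by Pre_solution
      | some v => answer ++ [v]
    else if c = 'D' then
      if answer = [] then answer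
      else if PySem.Str.slice op (some 2) none = "1" then
        match PySem.List.max? answer (fun x => x) with
        | some m => (PySem.List.remove? answer m).getD answer   -- answer.remove(max(answer))
        | none => answer  -- unreachable: answer ≠ []
      else
        match PySem.List.min? answer (fun x => x) with
        | some m => (PySem.List.remove? answer m).getD answer   -- answer.remove(min(answer))
        | none => answer  -- unreachable: answer ≠ []
    else answer

-- '[max(answer), min(answer)] if answer else [0, 0]'
def pvRetA (answer : List Int) : List Int :=
  match PySem.List.max? answer (fun x => x), PySem.List.min? answer (fun x => x) with
  | some M, some m => [M, m]
  | _, _ => [0, 0]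

def solution (operations : List String) : List Int :=
  pvRetA (operations.foldl pvStepA [])

-- ===== PORT B =====
-- the hand-rolled binary-search while-loop of Source B: insertion point for v in heap[lo:hi]
def pvFindPos (heap : List Int) (v : Int) (lo hi : Nat) : Nat :=
  if _h : lo < hi then
    let mid := (lo + hi) / 2
    if heap.getD mid 0 ≤ v then    -- heap[mid]; mid < hi ≤ len(heap) whenever called as in Source B
      pvFindPos heap v (mid + 1) hi
    else
      pvFindPos heap v lo mid
  else lo
termination_by hi - lo
decreasing_by all_goals omega

-- body of B's for-loop
def pvStepB (heap : List Int) (op : String) : List Int :=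
  match PySem.Str.pyGet? op 0 with
  | none => heap          -- op[0] on "" raises IndexError; excluded by Pre_solution
  | some kind =>
    if kind = 'I' then
      match PySem.Int.ofStr? (PySem.Str.slice op (some 2) none) with
      | none => heap      -- int(op[2:]) raises ValueError; excluded by Pre_solution
      | some v => PySem.List.insert heap ((pvFindPos heap v 0 heap.length : Nat) : Int) v
    else if kind = 'D' ∧ heap ≠ [] then
      if PySem.Str.slice op (some 2) none = "1" then
        heap.dropLast     -- heap.pop() under the nonempty guard
      else
        heap.tail         -- heap.pop(0) under the nonempty guard
    else heap

-- '[heap[-1], heap[0]] if heap else [0, 0]'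
def pvRetB (heap : List Int) : List Int :=
  match PySem.List.pyGet? heap (-1), PySem.List.pyGet? heap 0 with
  | some M, some m => [M, m]
  | _, _ => [0, 0]

def solution_alt (operations : List String) : List Int :=
  pvRetB (operations.foldl pvStepB [])

-- ===== PRECONDITION & SPEC =====
-- Pre_ excludes exactly the inputs on which Python A raises: an empty operation string
-- (IndexError on op[0]) and an operation starting with 'I' whose tail op[2:] is not a
-- valid int literal (ValueError on int(op[2:])).
def Pre_solution (operations : List String) : Prop :=
  ∀ op ∈ operations, op ≠ "" ∧
    (PySem.Str.pyGet? op 0 = some 'I' →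
      (PySem.Int.ofStr? (PySem.Str.slice op (some 2) none)).isSome = true)
instance (operations : List String) : Decidable (Pre_solution operations) := by
  unfold Pre_solution; infer_instance

def pvWitness_solution : List String := ["I 5", "I -3", "D 1", "I 2", "D -1"]

def Spec_solution (operations : List String) (out : List Int) : Prop := out = solution_alt operations
instance (operations : List String) (out : List Int) : Decidable (Spec_solution operations out) := by unfold Spec_solution; infer_instance

-- ===== CLAIM (what is proved, stated in full; the proofs are below) =====
def Claim_equal_solution : Prop := ∀ (operations : List String), Dom_solution operations → Pre_solution operations → Spec_solution operations (solution operations)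

-- ===== LEMMAS AND PROOFS =====

-- elements of a sorted list are bounded by its last element and bound its head
theorem pv_sorted_le_getLast {s : List Int} (hs : s.Pairwise (· ≤ ·)) {x : Int}
    (hx : x ∈ s) (h : s ≠ []) : x ≤ s.getLast h := by
  obtain ⟨i, hi, rfl⟩ := List.mem_iff_getElem.mp hx
  rw [List.getLast_eq_getElem]
  rcases Nat.lt_or_ge i (s.length - 1) with hlt | hge
  · exact List.pairwise_iff_getElem.mp hs i (s.length - 1) hi (by omega) hlt
  · have : i = s.length - 1 := by have := hi; omega
    simp [this]

theorem pv_sorted_head_le {s : List Int} (hs : s.Pairwise (· ≤ ·)) {x : Int}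
    (hx : x ∈ s) (h : s ≠ []) : s.head h ≤ x := by
  obtain ⟨i, hi, rfl⟩ := List.mem_iff_getElem.mp hx
  rw [List.head_eq_getElem]
  rcases Nat.eq_zero_or_pos i with rfl | hpos
  · exact le_refl _
  · exact List.pairwise_iff_getElem.mp hs 0 i (by omega) hi hpos

-- the max (resp. min) of A's multiset is the last (resp. first) element of B's sorted list
theorem pv_max_eq {a s : List Int} (hp : a.Perm s) (hs : s.Pairwise (· ≤ ·)) (h : s ≠ []) :
    PySem.List.max? a (fun x => x) = some (s.getLast h) := by
  have ha : a ≠ [] := by intro h0; subst h0; exact h hp.nil_eq.symm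
  obtain ⟨m, hm⟩ : ∃ m, PySem.List.max? a (fun x => x) = some m := by
    cases hmx : PySem.List.max? a (fun x => x) with
    | none => exact absurd ((PySem.List.max?_eq_none_iff _ _).mp hmx) ha
    | some m => exact ⟨m, rfl⟩
  have hmem : m ∈ s := hp.mem_iff.mp (PySem.List.max?_mem hm)
  have h1 : s.getLast h ≤ m :=
    PySem.List.max?_isMax hm _ (hp.mem_iff.mpr (List.getLast_mem h))
  have h2 : m ≤ s.getLast h := pv_sorted_le_getLast hs hmem h
  rw [hm, le_antisymm h2 h1]

theorem pv_min_eq {a s : List Int} (hp : a.Perm s) (hs : s.Pairwise (· ≤ ·)) (h : s ≠ []) :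
    PySem.List.min? a (fun x => x) = some (s.head h) := by
  have ha : a ≠ [] := by intro h0; subst h0; exact h hp.nil_eq.symm
  obtain ⟨m, hm⟩ : ∃ m, PySem.List.min? a (fun x => x) = some m := by
    cases hmx : PySem.List.min? a (fun x => x) with
    | none => exact absurd ((PySem.List.min?_eq_none_iff _ _).mp hmx) ha
    | some m => exact ⟨m, rfl⟩
  have hmem : m ∈ s := hp.mem_iff.mp (PySem.List.min?_mem hm)
  have h1 : m ≤ s.head h :=
    PySem.List.min?_isMin hm _ (hp.mem_iff.mpr (List.head_mem h))
  have h2 : s.head h ≤ m := pv_sorted_head_le hs hmem h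
  rw [hm, le_antisymm h1 h2]

theorem pv_getD_mono {heap : List Int} (hs : heap.Pairwise (· ≤ ·)) {i j : Nat}
    (hij : i ≤ j) (hj : j < heap.length) : heap.getD i 0 ≤ heap.getD j 0 := by
  rw [List.getD_eq_getElem heap 0 (by omega), List.getD_eq_getElem heap 0 hj]
  rcases Nat.lt_or_ge i j with hlt | hge
  · exact List.pairwise_iff_getElem.mp hs i j (by omega) hj hlt
  · have : i = j := by omega
    simp [this]

-- binary search spec
theorem pvFindPos_spec (heap : List Int) (v : Int) (hs : heap.Pairwise (· ≤ ·)) :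
    ∀ n lo hi, hi - lo = n → hi ≤ heap.length → lo ≤ hi →
    (∀ i, i < lo → heap.getD i 0 ≤ v) →
    (∀ i, hi ≤ i → i < heap.length → v < heap.getD i 0) →
    pvFindPos heap v lo hi ≤ heap.length ∧
    (∀ i, i < pvFindPos heap v lo hi → heap.getD i 0 ≤ v) ∧
    (∀ i, pvFindPos heap v lo hi ≤ i → i < heap.length → v < heap.getD i 0) := by
  intro n
  induction n using Nat.strong_induction_on with
  | _ n ih =>
    intro lo hi hn hhi hlh hbef haft
    rw [pvFindPos]
    by_cases hcmp : lo < hi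
    · simp only [hcmp, dif_pos]
      set mid := (lo + hi) / 2 with hmid
      have hmlt : mid < hi := by omega
      have hmge : lo ≤ mid := by omega
      by_cases hle : heap.getD mid 0 ≤ v
      · simp only [hle, if_pos]
        refine ih (hi - (mid + 1)) (by omega) (mid + 1) hi rfl hhi (by omega) ?_ haft
        intro i hi'
        exact le_trans (pv_getD_mono hs (by omega) (by omega)) hle
      · simp only [hle, if_neg, not_false_iff]
        refine ih (mid - lo) (by omega) lo mid rfl (by omega) hmge hbef ?_
        intro i hmi hil
        exact lt_of_lt_of_le (lt_of_not_ge hle) (pv_getD_mono hs hmi hil)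
    · simp only [hcmp, dif_neg, not_false_iff]
      have : lo = hi := by omega
      exact ⟨by omega, hbef, fun i hli hil => haft i (by omega) hil⟩

-- inserting at the found position keeps the list sorted and is a permutation append
theorem pv_insert_sorted (s : List Int) (v : Int) (hs : s.Pairwise (· ≤ ·)) :
    (PySem.List.insert s ((pvFindPos s v 0 s.length : Nat) : Int) v).Pairwise (· ≤ ·) := by
  obtain ⟨hple, hbef, haft⟩ :=
    pvFindPos_spec s v hs s.length 0 s.length rfl (le_refl _) (Nat.zero_le _)
      (fun i hi => absurd hi (Nat.not_lt_zero i)) (fun i h1 h2 => absurd h1 (by omega))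
  set p := pvFindPos s v 0 s.length
  rw [PySem.List.insert_natCast s p v hple]
  have htake : ∀ x ∈ s.take p, x ≤ v := by
    intro x hx
    obtain ⟨i, hi, rfl⟩ := List.mem_iff_getElem.mp hx
    have hi' : i < p := by simpa using lt_of_lt_of_le hi (by simp [List.length_take])
    rw [List.getElem_take]
    rw [← List.getD_eq_getElem s 0 (by simp at hi; omega)]
    exact hbef i hi'
  have hdrop : ∀ y ∈ s.drop p, v ≤ y := by
    intro y hy
    obtain ⟨i, hi, rfl⟩ := List.mem_iff_getElem.mp hy
    rw [List.getElem_drop]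
    have hlen : p + i < s.length := by simp [List.length_drop] at hi; omega
    rw [← List.getD_eq_getElem s 0 hlen]
    exact le_of_lt (haft (p + i) (by omega) hlen)
  refine List.pairwise_append.mpr ⟨hs.sublist (List.take_sublist p s), ?_, ?_⟩
  · exact List.pairwise_cons.mpr ⟨hdrop, hs.sublist (List.drop_sublist p s)⟩
  · intro x hx y hy
    rcases List.mem_cons.mp hy with rfl | hy'
    · exact htake x hx
    · exact le_trans (htake x hx) (hdrop y hy')

theorem pvFindPos_le (heap : List Int) (v : Int) :
    ∀ n lo hi, hi - lo = n → lo ≤ hi → pvFindPos heap v lo hi ≤ hi := by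
  intro n
  induction n using Nat.strong_induction_on with
  | _ n ih =>
    intro lo hi hn hlh
    rw [pvFindPos]
    by_cases hcmp : lo < hi
    · simp only [hcmp, dif_pos]
      by_cases hle : heap.getD ((lo + hi) / 2) 0 ≤ v
      · simp only [hle, if_pos]
        exact ih (hi - ((lo + hi) / 2 + 1)) (by omega) _ hi rfl (by omega)
      · simp only [hle, if_neg, not_false_iff]
        exact le_trans (ih ((lo + hi) / 2 - lo) (by omega) lo _ rfl (by omega)) (by omega)
    · simp only [hcmp, dif_neg, not_false_iff]
      omega

theorem pv_insert_perm {a s : List Int} (hp : a.Perm s) (v : Int) :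
    (a ++ [v]).Perm (PySem.List.insert s ((pvFindPos s v 0 s.length : Nat) : Int) v) := by
  have hple : pvFindPos s v 0 s.length ≤ s.length :=
    pvFindPos_le s v s.length 0 s.length rfl (Nat.zero_le _)
  rw [PySem.List.insert_natCast s _ v hple]
  refine ((List.perm_append_singleton v a).trans (hp.cons v)).trans ?_
  have h := (List.perm_middle (a := v) (l₁ := s.take (pvFindPos s v 0 s.length))
      (l₂ := s.drop (pvFindPos s v 0 s.length))).symm
  simpa [List.take_append_drop] using h

-- one loop step preserves the invariant: A's list stays a permutation of B's sorted list
theorem pv_step_inv {a s : List Int} (op : String) (hp : a.Perm s) (hs : s.Pairwise (· ≤ ·)) :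
    (pvStepA a op).Perm (pvStepB s op) ∧ (pvStepB s op).Pairwise (· ≤ ·) := by
  unfold pvStepA pvStepB
  cases hc : PySem.Str.pyGet? op 0 with
  | none => exact ⟨hp, hs⟩
  | some c =>
    by_cases hI : c = 'I'
    · subst hI
      simp only [if_true]
      cases hv : PySem.Int.ofStr? (PySem.Str.slice op (some 2) none) with
      | none => exact ⟨hp, hs⟩
      | some v => exact ⟨pv_insert_perm hp v, pv_insert_sorted s v hs⟩
    · by_cases hD : c = 'D'
      · subst hD
        simp only [if_neg hI]
        by_cases hnil : a = []
        · have hsnil : s = [] := by rw [hnil] at hp; exact hp.nil_eq.symm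
          simp [hnil, hsnil]
        · have hsnil : s ≠ [] := fun h0 => hnil (by rw [h0] at hp; exact hp.eq_nil)
          simp only [if_neg hnil, hsnil, ne_eq, not_false_eq_true, and_self, if_pos]
          by_cases h1 : PySem.Str.slice op (some 2) none = "1"
          · simp only [if_pos h1]
            -- delete-max: A removes the first max, B drops the last element
            rw [pv_max_eq hp hs hsnil]
            have hmem_a : s.getLast hsnil ∈ a := hp.mem_iff.mpr (List.getLast_mem hsnil)
            change ((PySem.List.remove? a (s.getLast hsnil)).getD a).Perm s.dropLast ∧ _
            rw [PySem.List.remove?_eq_some_erase a _ hmem_a, Option.getD_some]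
            constructor
            · have hdecomp : s.dropLast ++ [s.getLast hsnil] = s :=
                List.dropLast_append_getLast hsnil
              have h2 : (s.erase (s.getLast hsnil)).Perm s.dropLast := by
                have h3 := (List.perm_append_singleton (s.getLast hsnil) s.dropLast).erase
                  (s.getLast hsnil)
                rw [List.erase_cons_head, hdecomp] at h3
                exact h3
              exact (hp.erase _).trans h2
            · exact hs.sublist (List.dropLast_sublist s)
          · simp only [if_neg h1]
            -- delete-min: A removes the first min, B drops the head
            rw [pv_min_eq hp hs hsnil]
            have hmem_a : s.head hsnil ∈ a := hp.mem_iff.mpr (List.head_mem hsnil)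
            change ((PySem.List.remove? a (s.head hsnil)).getD a).Perm s.tail ∧ _
            rw [PySem.List.remove?_eq_some_erase a _ hmem_a, Option.getD_some]
            constructor
            · obtain ⟨x, t, rfl⟩ := List.exists_cons_of_ne_nil hsnil
              simpa [List.erase_cons_head] using hp.erase x
            · exact hs.sublist (List.tail_sublist s)
      · have : ¬ (c = 'D' ∧ s ≠ []) := fun ⟨h, _⟩ => hD h
        simp only [if_neg hI, if_neg hD, if_neg this]
        exact ⟨hp, hs⟩

theorem pv_fold_inv (ops : List String) :
    ∀ {a s : List Int}, a.Perm s → s.Pairwise (· ≤ ·) →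
    (ops.foldl pvStepA a).Perm (ops.foldl pvStepB s) ∧ (ops.foldl pvStepB s).Pairwise (· ≤ ·) := by
  induction ops with
  | nil => exact fun hp hs => ⟨hp, hs⟩
  | cons op rest ih =>
    intro a s hp hs
    obtain ⟨hp', hs'⟩ := pv_step_inv op hp hs
    simpa [List.foldl] using ih hp' hs'

-- the two result expressions agree on a permutation pair with sorted right-hand side
theorem pv_ret_eq {a s : List Int} (hp : a.Perm s) (hs : s.Pairwise (· ≤ ·)) :
    pvRetA a = pvRetB s := by
  by_cases hnil : s = []
  · have hanil : a = [] := by rw [hnil] at hp; exact hp.eq_nil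
    subst hnil hanil
    simp [pvRetA, pvRetB, PySem.List.pyGet?_neg_one, PySem.List.pyGet?_zero,
      (PySem.List.max?_eq_none_iff ([] : List Int) (fun x => x)).mpr rfl,
      (PySem.List.min?_eq_none_iff ([] : List Int) (fun x => x)).mpr rfl]
  · unfold pvRetA pvRetB
    rw [pv_max_eq hp hs hnil, pv_min_eq hp hs hnil,
      PySem.List.pyGet?_neg_one, PySem.List.pyGet?_zero,
      List.getLast?_eq_some_getLast hnil, ← List.head?_eq_getElem?,
      List.head?_eq_some_head hnil]

-- ===== VERDICT (by name: the statement is the Claim_ definition above) =====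
theorem solution_spec : Claim_equal_solution := by
  intro operations _ _
  unfold Spec_solution solution solution_alt
  obtain ⟨hp, hs⟩ := pv_fold_inv operations (a := []) (s := []) (List.Perm.refl []) (by simp)
  exact pv_ret_eq hp hs
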